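-- pv_equiv track=rewrite | github.com/erikveenhuis/ideal-octo-computing-machine | utils.py | sanitize_search_input
-- ===== SOURCE A (Python) =====
-- from typing import Optional, Callable, Any, List, Dict, Union
--
-- def sanitize_search_input(name: Optional[str]) -> str:
--     """Sanitize search input to prevent injection attacks."""
--     if not name:
--         return ""
--
--     # Remove potentially dangerous characters
--     dangerous_chars = ['<', '>', '"', "'", '&', ';', '(', ')', '|', '`']
--     sanitized = name
--     for char in dangerous_chars:
--         sanitized = sanitized.replace(char, '')
--
--     # Limit length
--     return sanitized.strip()[:100]
-- ===== SOURCE B (Python) =====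
-- from typing import Optional
--
-- def sanitize_search_input(name: Optional[str]) -> str:
--     """Sanitize search input to prevent injection attacks."""
--     if not name:
--         return ""
--     # single filtering pass over the input characters
--     chars = [c for c in name if c not in '<>"\'&;()|`']
--     # trim leading whitespace
--     while chars and chars[0].isspace():
--         chars.pop(0)
--     # trim trailing whitespace
--     while chars and chars[-1].isspace():
--         chars.pop()
--     # limit length
--     return ''.join(chars[:100])
-- ===== Notes on version B (the rewrite author's own statement) =====
-- stated objective: alternative
-- what changed: Replaces ten sequential full-string .replace passes followed by strip()[:100] with one filtering pass over the input characters into a list, explicit trim-from-both-ends loops for whitespace, and a join of the first 100 kept characters.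
import Mathlib
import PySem

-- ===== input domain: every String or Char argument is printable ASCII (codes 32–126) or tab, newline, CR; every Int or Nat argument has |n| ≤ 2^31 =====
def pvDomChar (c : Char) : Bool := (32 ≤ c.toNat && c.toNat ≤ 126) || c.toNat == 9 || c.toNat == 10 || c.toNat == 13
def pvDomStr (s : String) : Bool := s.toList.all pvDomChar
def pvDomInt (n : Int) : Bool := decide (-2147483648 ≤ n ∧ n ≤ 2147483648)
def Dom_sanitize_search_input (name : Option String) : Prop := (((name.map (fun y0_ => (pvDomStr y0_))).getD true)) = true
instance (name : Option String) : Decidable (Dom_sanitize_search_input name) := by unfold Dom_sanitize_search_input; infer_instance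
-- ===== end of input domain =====

-- B replaces A's ten sequential single-char .replace passes + strip()[:100] with one filtering
-- pass, explicit whitespace trim loops on both ends, and take-100 (objective: alternative).


-- ===== PORT A =====
-- dangerous_chars, in A's list order
def dangerousA : List Char := ['<', '>', '"', '\'', '&', ';', '(', ')', '|', '`']

-- Port of A: sequential `.replace(char, '')` for each dangerous char, then strip, then [:100]
def sanitize_search_input (name : Option String) : String :=
  match name with
  | none => ""
  | some s =>
    if s.toList.isEmpty then ""
    else
      let sanitized := dangerousA.foldl (fun acc c => PySem.Chars.replace acc [c] []) s.toList
      String.ofList (PySem.Chars.slice (PySem.Chars.strip sanitized) none (some 100))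

-- ===== PORT B =====
-- B's dangerous-character string literal
def dangerousB : String := "<>\"'&;()|`"

-- `while chars and chars[0].isspace(): chars.pop(0)` — drop leading whitespace, one char per step
def trimLead : List Char → List Char
  | [] => []
  | c :: t => if PySem.Chars.isspace c then trimLead t else c :: t

-- `while chars and chars[-1].isspace(): chars.pop()` — popping whitespace from the END is
-- trimming the lead of the reversed list (exact: same chars removed)
def trimTrail (l : List Char) : List Char := (trimLead l.reverse).reverse

-- Port of B: filter comprehension, two trim loops, join of the first 100 chars
def sanitize_search_input_alt (name : Option String) : String :=
  match name with
  | none => ""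
  | some s =>
    if s.toList.isEmpty then ""
    else
      let chars := s.toList.filter (fun c => !dangerousB.toList.contains c)
      String.ofList ((trimTrail (trimLead chars)).take 100)

-- ===== PRECONDITION & SPEC =====
def Spec_sanitize_search_input (name : Option String) (out : String) : Prop := out = sanitize_search_input_alt name
instance (name : Option String) (out : String) : Decidable (Spec_sanitize_search_input name out) := by unfold Spec_sanitize_search_input; infer_instance

-- ===== CLAIM (what is proved, stated in full; the proofs are below) =====
def Claim_equal_sanitize_search_input : Prop := ∀ (name : Option String), Dom_sanitize_search_input name → Spec_sanitize_search_input name (sanitize_search_input name)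

-- ===== LEMMAS AND PROOFS =====

-- replace s [c] [] removes every occurrence of c
lemma replace_go_single (c : Char) :
    ∀ (fuel : Nat) (l acc : List Char), l.length ≤ fuel →
      PySem.Chars.replace.go [c] [] fuel l acc = acc.reverse ++ l.filter (fun x => x ≠ c) := by
  intro fuel
  induction fuel with
  | zero =>
    intro l acc h
    have : l = [] := List.eq_nil_of_length_eq_zero (Nat.le_zero.mp h)
    subst this
    simp [PySem.Chars.replace.go]
  | succ n ih =>
    intro l acc h
    cases l with
    | nil => simp [PySem.Chars.replace.go]
    | cons a t =>
      simp only [PySem.Chars.replace.go]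
      by_cases hc : a = c
      · subst hc
        simp only [List.isPrefixOf, BEq.rfl, Bool.true_and, if_true, List.length_cons,
          List.length_nil, Nat.zero_add, List.drop_succ_cons, List.drop_zero, List.reverse_nil,
          List.nil_append]
        rw [ih t acc (by simpa using Nat.le_of_succ_le_succ h)]
        simp [List.filter]
      · have hpre : [c].isPrefixOf (a :: t) = false := by
          simp [List.isPrefixOf]
          exact fun hh => absurd hh.symm hc
        simp only [hpre, Bool.false_eq_true, if_false]
        rw [ih t (a :: acc) (by simpa using Nat.le_of_succ_le_succ h)]
        simp [List.filter, hc]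

lemma replace_single (c : Char) (s : List Char) :
    PySem.Chars.replace s [c] [] = s.filter (fun x => x ≠ c) := by
  have : PySem.Chars.replace s [c] [] = PySem.Chars.replace.go [c] [] s.length s [] := by
    simp [PySem.Chars.replace]
  rw [this, replace_go_single c s.length s [] le_rfl]
  simp

-- ten sequential single-char removals = one filtering pass
lemma foldl_replace_eq_filter (cs : List Char) (s : List Char) :
    cs.foldl (fun acc c => PySem.Chars.replace acc [c] []) s
      = s.filter (fun x => !cs.contains x) := by
  induction cs generalizing s with
  | nil => simp
  | cons c cs ih =>
    simp only [List.foldl_cons]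
    rw [replace_single, ih, List.filter_filter]
    apply List.filter_congr
    intro x _
    by_cases h : x = c <;> simp [h]

-- the trim loop is dropWhile isspace
lemma trimLead_eq_dropWhile (l : List Char) :
    trimLead l = l.dropWhile PySem.Chars.isspace := by
  induction l with
  | nil => rfl
  | cons c t ih =>
    simp only [trimLead, List.dropWhile_cons]
    split_ifs with h <;> simp [h, ih]

-- Python strip = trim both ends
lemma strip_eq_trim (l : List Char) :
    PySem.Chars.strip l = trimTrail (trimLead l) := by
  simp [PySem.Chars.strip, PySem.Chars.lstrip, PySem.Chars.rstrip, trimTrail,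
    trimLead_eq_dropWhile]

-- ===== VERDICT (by name: the statement is the Claim_ definition above) =====
theorem sanitize_search_input_spec : Claim_equal_sanitize_search_input := by
  intro name _
  unfold Spec_sanitize_search_input sanitize_search_input sanitize_search_input_alt
  cases name with
  | none => rfl
  | some s =>
    simp only
    rw [foldl_replace_eq_filter, strip_eq_trim]
    have hslice : ∀ (l : List Char), PySem.Chars.slice l none (some 100) = l.take 100 := by
      intro l
      have := PySem.List.slice_to l (b := 100) (by norm_num)
      simpa using this
    rw [hslice]
    have : dangerousA = dangerousB.toList := by decide
    rw [this]
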